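-- pv_equiv track=rewrite | github.com/zdkano/parity-zero | reviewer/prompt_builder.py | _find_natural_boundary
-- ===== SOURCE A (Python) =====
-- def _find_natural_boundary(text: str) -> int:
--     """Find the best natural code boundary (function/class def) position.
--
--     Searches backward from the end of text for a line starting with
--     a function or class definition, returning the position just before
--     that line.  Returns 0 if no boundary is found.
--     """
--     # Common function/class definition patterns across languages.
--     boundary_markers = (
--         "\ndef ", "\nclass ", "\nasync def ",
--         "\nfunction ", "\nexport function ", "\nexport default function ",
--         "\nconst ", "\nlet ",
--         "\npub fn ", "\nfn ",
--         "\nfunc ",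
--         "\npublic ", "\nprivate ", "\nprotected ",
--         "\nrouter.", "\napp.",
--     )
--     best = 0
--     for marker in boundary_markers:
--         pos = text.rfind(marker)
--         if pos > best:
--             best = pos
--     return best
-- ===== SOURCE B (Python) =====
-- def _find_natural_boundary(text: str) -> int:
--     """Single forward scan: at each newline, test whether the next line starts
--     with one of the definition keywords; the last (= rightmost) hit wins."""
--     keywords = (
--         "def ", "class ", "async def ",
--         "function ", "export function ", "export default function ",
--         "const ", "let ",
--         "pub fn ", "fn ",
--         "func ",
--         "public ", "private ", "protected ",
--         "router.", "app.",
--     )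
--     best = 0
--     for i, ch in enumerate(text):
--         if ch == "\n" and text.startswith(keywords, i + 1):
--             best = i
--     return best
-- ===== Notes on version B (the rewrite author's own statement) =====
-- stated objective: alternative
-- what changed: one forward scan over newline positions with a tuple-startswith test at each newline replaces sixteen separate backward rfind scans of the whole text
import Mathlib
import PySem

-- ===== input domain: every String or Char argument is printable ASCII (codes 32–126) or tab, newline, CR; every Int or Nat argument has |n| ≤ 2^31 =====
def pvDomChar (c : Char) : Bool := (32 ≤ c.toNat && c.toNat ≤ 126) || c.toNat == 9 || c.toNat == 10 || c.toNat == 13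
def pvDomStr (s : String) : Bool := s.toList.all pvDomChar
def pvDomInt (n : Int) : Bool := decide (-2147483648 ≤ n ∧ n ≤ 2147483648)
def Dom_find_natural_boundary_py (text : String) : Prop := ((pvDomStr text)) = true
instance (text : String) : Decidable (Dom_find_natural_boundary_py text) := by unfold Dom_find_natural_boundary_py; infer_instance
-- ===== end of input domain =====

-- B replaces A's sixteen backward whole-text rfind scans by a single forward scan over
-- newline positions (alternative structure, same exact result).

-- ===== PORT A =====
-- the tuple of markers, as lists of characters
def pvMarkers : List (List Char) :=
  ["\ndef ".toList, "\nclass ".toList, "\nasync def ".toList,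
   "\nfunction ".toList, "\nexport function ".toList, "\nexport default function ".toList,
   "\nconst ".toList, "\nlet ".toList,
   "\npub fn ".toList, "\nfn ".toList,
   "\nfunc ".toList,
   "\npublic ".toList, "\nprivate ".toList, "\nprotected ".toList,
   "\nrouter.".toList, "\napp.".toList]

-- str.rfind: scan candidate start positions downward from j; -1 if no occurrence
def pvRfindFrom (s m : List Char) : Nat → Int
  | 0 => if m.isPrefixOf s then 0 else -1
  | j + 1 => if m.isPrefixOf (s.drop (j + 1)) then ((j : Int) + 1) else pvRfindFrom s m j

def pvRfind (s m : List Char) : Int := pvRfindFrom s m s.length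

def find_natural_boundary_py (text : String) : Int :=
  pvMarkers.foldl
    (fun best marker =>
      let pos := pvRfind text.toList marker
      if pos > best then pos else best)
    0

-- ===== PORT B =====
-- the bare keywords (markers without the leading newline)
def pvKeywords : List (List Char) :=
  ["def ".toList, "class ".toList, "async def ".toList,
   "function ".toList, "export function ".toList, "export default function ".toList,
   "const ".toList, "let ".toList,
   "pub fn ".toList, "fn ".toList,
   "func ".toList,
   "public ".toList, "private ".toList, "protected ".toList,
   "router.".toList, "app.".toList]

def find_natural_boundary_py_alt (text : String) : Int :=
  let s := text.toList
  (List.range s.length).foldl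
    (fun best i =>
      if (s[i]? == some '\n') && pvKeywords.any (fun k => k.isPrefixOf (s.drop (i + 1))) then
        (i : Int)
      else best)
    0

-- ===== PRECONDITION & SPEC =====
def Spec_find_natural_boundary_py (text : String) (out : Int) : Prop := out = find_natural_boundary_py_alt text
instance (text : String) (out : Int) : Decidable (Spec_find_natural_boundary_py text out) := by unfold Spec_find_natural_boundary_py; infer_instance

-- ===== CLAIM (what is proved, stated in full; the proofs are below) =====
def Claim_equal_find_natural_boundary_py : Prop := ∀ (text : String), Dom_find_natural_boundary_py text → Spec_find_natural_boundary_py text (find_natural_boundary_py text)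

-- ===== LEMMAS AND PROOFS =====

-- "last hit" fold over positions: largest i < n with p i, else 0
def pvLastHit (p : Nat → Bool) (n : Nat) : Int :=
  (List.range n).foldl (fun best i => if p i then (i : Int) else best) 0

theorem pvLastHit_succ (p : Nat → Bool) (n : Nat) :
    pvLastHit p (n + 1) = if p n then (n : Int) else pvLastHit p n := by
  simp [pvLastHit, List.range_succ]

theorem pvLastHit_nonneg (p : Nat → Bool) (n : Nat) : 0 ≤ pvLastHit p n := by
  induction n with
  | zero => simp [pvLastHit]
  | succ n ih => rw [pvLastHit_succ]; split_ifs <;> omega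

theorem pvLastHit_le (p : Nat → Bool) (n : Nat) : pvLastHit p n ≤ (n : Int) := by
  induction n with
  | zero => simp [pvLastHit]
  | succ n ih => rw [pvLastHit_succ]; split_ifs <;> omega

theorem pvLastHit_or (p q : Nat → Bool) (n : Nat) :
    pvLastHit (fun i => p i || q i) n =
      (if pvLastHit q n > pvLastHit p n then pvLastHit q n else pvLastHit p n) := by
  induction n with
  | zero => simp [pvLastHit]
  | succ n ih =>
    have hp := pvLastHit_le p n
    have hq := pvLastHit_le q n
    rw [pvLastHit_succ, pvLastHit_succ, pvLastHit_succ, ih]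
    cases hpn : p n <;> cases hqn : q n <;>
      simp only [hpn, hqn, Bool.or_false, Bool.or_true, Bool.or_self, if_true] <;>
        split_ifs <;> omega

theorem pvLastHit_congr (p q : Nat → Bool) (n : Nat) (h : ∀ i, p i = q i) :
    pvLastHit p n = pvLastHit q n := by
  have : p = q := funext h
  rw [this]

-- rfind agrees with the forward last-hit fold, once combined with a nonnegative accumulator
theorem pvRfindFrom_comb (s m : List Char) (j : Nat) (b : Int) (hb : 0 ≤ b) :
    (if pvRfindFrom s m j > b then pvRfindFrom s m j else b) =
      (if pvLastHit (fun i => m.isPrefixOf (s.drop i)) (j + 1) > b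
       then pvLastHit (fun i => m.isPrefixOf (s.drop i)) (j + 1) else b) := by
  induction j with
  | zero =>
    simp only [pvRfindFrom, pvLastHit_succ]
    cases h : m.isPrefixOf (s.drop 0) <;> simp [pvLastHit] <;> split_ifs <;> omega
  | succ j ih =>
    rw [pvLastHit_succ]
    simp only [pvRfindFrom]
    cases h : m.isPrefixOf (s.drop (j + 1)) <;> simp [ih]

-- A's fold over markers equals one last-hit fold with an "any marker matches here" test
theorem pvFold_markers (s : List Char) (ms : List (List Char)) (b : Int) (hb : 0 ≤ b) :
    ms.foldl (fun best marker =>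
        let pos := pvRfind s marker
        if pos > best then pos else best) b =
      (if pvLastHit (fun i => ms.any (fun m => m.isPrefixOf (s.drop i))) (s.length + 1) > b
       then pvLastHit (fun i => ms.any (fun m => m.isPrefixOf (s.drop i))) (s.length + 1) else b) := by
  induction ms generalizing b with
  | nil =>
    have h0 : pvLastHit (fun i => ([] : List (List Char)).any (fun m => m.isPrefixOf (s.drop i))) (s.length + 1) = 0 := by
      have : pvLastHit (fun i => ([] : List (List Char)).any (fun m => m.isPrefixOf (s.drop i))) (s.length + 1)
           = pvLastHit (fun _ => false) (s.length + 1) := pvLastHit_congr _ _ _ (by simp)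
      rw [this]
      clear this
      induction (s.length + 1) with
      | zero => simp [pvLastHit]
      | succ n ih => rw [pvLastHit_succ]; simpa using ih
    simp only [List.foldl_nil]
    rw [h0]
    split_ifs <;> omega
  | cons m ms ih =>
    simp only [List.foldl_cons]
    have hb' : 0 ≤ (if pvRfind s m > b then pvRfind s m else b) := by split_ifs <;> omega
    rw [ih _ hb']
    rw [show pvRfind s m = pvRfindFrom s m s.length from rfl, pvRfindFrom_comb s m s.length b hb]
    have hor := pvLastHit_or (fun i => m.isPrefixOf (s.drop i))
      (fun i => ms.any (fun m' => m'.isPrefixOf (s.drop i))) (s.length + 1)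
    have hcg : pvLastHit (fun i => (m :: ms).any (fun m' => m'.isPrefixOf (s.drop i))) (s.length + 1)
        = pvLastHit (fun i => m.isPrefixOf (s.drop i) || ms.any (fun m' => m'.isPrefixOf (s.drop i))) (s.length + 1) :=
      pvLastHit_congr _ _ _ (by simp)
    rw [hcg, hor]
    have h1 := pvLastHit_nonneg (fun i => m.isPrefixOf (s.drop i)) (s.length + 1)
    have h2 := pvLastHit_nonneg (fun i => ms.any (fun m' => m'.isPrefixOf (s.drop i))) (s.length + 1)
    split_ifs <;> omega

-- each marker is a newline followed by the corresponding keyword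
theorem pvMarkers_eq : pvMarkers = pvKeywords.map (fun k => '\n' :: k) := by decide

-- matching "\n"++k at i  =  char at i is '\n' and k matches at i+1
theorem pvCons_prefix_drop (c : Char) (k : List Char) (s : List Char) (i : Nat) :
    (c :: k).isPrefixOf (s.drop i) = ((s[i]? == some c) && k.isPrefixOf (s.drop (i + 1))) := by
  induction i generalizing s with
  | zero => cases s with
    | nil => simp
    | cons a t => simp [List.isPrefixOf, BEq.comm]
  | succ i ih => cases s with
    | nil => simp
    | cons a t => simpa using ih t

-- matching any of the newline-prefixed markers = newline here and some keyword next
theorem pvAny_map_cons (ks : List (List Char)) (c : Char) (s : List Char) (i : Nat) :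
    (ks.map (fun k => c :: k)).any (fun m => m.isPrefixOf (s.drop i)) =
      ((s[i]? == some c) && ks.any (fun k => k.isPrefixOf (s.drop (i + 1)))) := by
  induction ks with
  | nil => simp
  | cons k ks ih => simp [pvCons_prefix_drop, ih, Bool.and_or_distrib_left]

-- no marker matches at position length (the markers are nonempty)
theorem pvNoMatch_at_len (s : List Char) :
    pvMarkers.any (fun m => m.isPrefixOf (s.drop s.length)) = false := by
  rw [List.drop_length]
  decide

-- ===== VERDICT (by name: the statement is the Claim_ definition above) =====
theorem find_natural_boundary_py_spec : Claim_equal_find_natural_boundary_py := by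
  intro text _
  unfold Spec_find_natural_boundary_py
  show find_natural_boundary_py text = find_natural_boundary_py_alt text
  set s := text.toList with hs
  have hA : find_natural_boundary_py text
      = pvLastHit (fun i => pvMarkers.any (fun m => m.isPrefixOf (s.drop i))) (s.length + 1) := by
    unfold find_natural_boundary_py
    rw [← hs, pvFold_markers s pvMarkers 0 le_rfl]
    have := pvLastHit_nonneg (fun i => pvMarkers.any (fun m => m.isPrefixOf (s.drop i))) (s.length + 1)
    split_ifs <;> omega
  have hdrop : pvLastHit (fun i => pvMarkers.any (fun m => m.isPrefixOf (s.drop i))) (s.length + 1)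
      = pvLastHit (fun i => pvMarkers.any (fun m => m.isPrefixOf (s.drop i))) s.length := by
    rw [pvLastHit_succ, pvNoMatch_at_len]
    simp
  have hB : find_natural_boundary_py_alt text
      = pvLastHit (fun i => (s[i]? == some '\n') && pvKeywords.any (fun k => k.isPrefixOf (s.drop (i + 1)))) s.length := rfl
  rw [hA, hdrop, hB]
  apply pvLastHit_congr
  intro i
  rw [pvMarkers_eq, pvAny_map_cons]
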